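-- pv_equiv track=rewrite | github.com/ZafirSadik/ESPRESSO | espresso.py | combine_terms
-- ===== SOURCE A (Python) =====
-- def combine_terms(term1, term2):
--     combined = ''
--     differences = 0
--     for a, b in zip(term1, term2):
--         if a == b:
--             combined += a
--         elif a != b and a != '-' and b != '-':
--             combined += '-'
--             differences += 1
--         else:
--             combined += '-'
--             differences += 1
--     if differences == 1:
--         return combined
--     else:
--         return None
-- ===== SOURCE B (Python) =====
-- def combine_terms(term1, term2):
--     minlen = min(len(term1), len(term2))
--     diffs = [i for i in range(minlen) if term1[i] != term2[i]]
--     if len(diffs) != 1: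
--         return None
--     i = diffs[0]
--     return term1[:i] + '-' + term1[i + 1:minlen]
-- ===== Notes on version B (the rewrite author's own statement) =====
-- stated objective: alternative
-- what changed: B first collects the list of differing positions over the common prefix length, then reconstructs the combined term by slicing term1 around the single differing index, instead of A's single fused loop that builds the combined string and a difference counter character by character.
import Mathlib
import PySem

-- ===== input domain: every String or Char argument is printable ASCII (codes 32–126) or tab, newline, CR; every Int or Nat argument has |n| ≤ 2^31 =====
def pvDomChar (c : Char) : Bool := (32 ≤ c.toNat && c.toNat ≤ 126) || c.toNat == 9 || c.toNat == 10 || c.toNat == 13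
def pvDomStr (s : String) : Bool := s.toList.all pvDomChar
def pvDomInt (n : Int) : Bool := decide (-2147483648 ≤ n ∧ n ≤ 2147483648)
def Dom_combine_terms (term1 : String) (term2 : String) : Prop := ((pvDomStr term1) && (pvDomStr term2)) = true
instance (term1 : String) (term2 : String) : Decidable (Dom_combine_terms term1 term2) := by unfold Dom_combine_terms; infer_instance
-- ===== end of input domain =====

-- B first lists the differing positions over the common prefix, then rebuilds the result by
-- slicing term1 around the single differing index; A fuses construction and counting in one loop.
-- Same return value everywhere (both total); objective: alternative decomposition.

-- ===== PORT A =====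
-- for a, b in zip(term1, term2): build `combined` and count `differences`; return combined iff exactly one
def combine_terms (term1 : String) (term2 : String) : Option String :=
  let st := (term1.toList.zip term2.toList).foldl
    (fun (s : List Char × Int) ab =>
      if ab.1 = ab.2 then (s.1 ++ [ab.1], s.2)
      else if ab.1 ≠ ab.2 ∧ ab.1 ≠ '-' ∧ ab.2 ≠ '-' then (s.1 ++ ['-'], s.2 + 1)
      else (s.1 ++ ['-'], s.2 + 1))
    ([], 0)
  if st.2 = 1 then some (String.ofList st.1) else none

-- ===== PORT B =====
def combine_terms_alt (term1 : String) (term2 : String) : Option String :=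
  let l1 := term1.toList
  let l2 := term2.toList
  let minlen : Int := min (l1.length : Int) (l2.length : Int)
  -- diffs = [i for i in range(minlen) if term1[i] != term2[i]]
  let diffs := (PySem.List.pyRange 0 minlen 1).filter
    (fun i => PySem.List.pyGet? l1 i ≠ PySem.List.pyGet? l2 i)
  if diffs.length ≠ 1 then none
  else
    let i := PySem.List.pyGetD diffs 0 0   -- i = diffs[0]; diffs is nonempty here
    some (String.ofList (PySem.List.slice l1 none (some i) ++ ['-'] ++
                         PySem.List.slice l1 (some (i + 1)) (some minlen)))

-- ===== PRECONDITION & SPEC =====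
def Spec_combine_terms (term1 : String) (term2 : String) (out : Option String) : Prop := out = combine_terms_alt term1 term2
instance (term1 : String) (term2 : String) (out : Option String) : Decidable (Spec_combine_terms term1 term2 out) := by unfold Spec_combine_terms; infer_instance

-- ===== CLAIM (what is proved, stated in full; the proofs are below) =====
def Claim_equal_combine_terms : Prop := ∀ (term1 : String) (term2 : String), Dom_combine_terms term1 term2 → Spec_combine_terms term1 term2 (combine_terms term1 term2)

-- ===== LEMMAS AND PROOFS =====

-- A's fold appends the pointwise combination and adds the number of mismatched pairs.
theorem pvFoldA (ps : List (Char × Char)) (acc : List Char) (d : Int) :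
    ps.foldl
      (fun (s : List Char × Int) ab =>
        if ab.1 = ab.2 then (s.1 ++ [ab.1], s.2)
        else if ab.1 ≠ ab.2 ∧ ab.1 ≠ '-' ∧ ab.2 ≠ '-' then (s.1 ++ ['-'], s.2 + 1)
        else (s.1 ++ ['-'], s.2 + 1))
      (acc, d)
    = (acc ++ ps.map (fun p => if p.1 = p.2 then p.1 else '-'),
       d + (ps.countP (fun p => decide (p.1 ≠ p.2)) : Int)) := by
  induction ps generalizing acc d with
  | nil => simp
  | cons p ps ih =>
    rw [List.foldl_cons]
    by_cases h : p.1 = p.2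
    · rw [if_pos h, ih]
      simp [h]
    · rw [if_neg h]
      have hstep : (if p.1 ≠ p.2 ∧ p.1 ≠ '-' ∧ p.2 ≠ '-' then ((acc, d).1 ++ ['-'], (acc, d).2 + 1)
          else ((acc, d).1 ++ ['-'], (acc, d).2 + 1)) = (acc ++ ['-'], d + 1) := by
        split_ifs <;> rfl
      rw [hstep, ih]
      simp [h]
      ring

-- number of mismatched zip pairs = number of mismatch indices below the common length
theorem pvCount (l1 l2 : List Char) :
    (l1.zip l2).countP (fun p => decide (p.1 ≠ p.2))
    = (List.range (min l1.length l2.length)).countP (fun i => decide (l1[i]? ≠ l2[i]?)) := by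
  induction l1 generalizing l2 with
  | nil => simp
  | cons a l1 ih =>
    cases l2 with
    | nil => simp
    | cons b l2 =>
      have hmin : min (a :: l1).length (b :: l2).length = min l1.length l2.length + 1 := by
        simp [Nat.succ_min_succ]
      rw [List.zip_cons_cons, List.countP_cons, hmin, List.range_succ_eq_map,
        List.countP_cons, List.countP_map, ih l2]
      have hpred : ((fun i => decide ((a :: l1)[i]? ≠ (b :: l2)[i]?)) ∘ Nat.succ)
          = (fun i => decide (l1[i]? ≠ l2[i]?)) := by
        funext i; simp [Function.comp]
      rw [hpred]
      simp

-- when i is the unique mismatch index, A's combined string is term1 with position i replaced by '-'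
theorem pvRebuild (l1 l2 : List Char) (i : Nat)
    (hfil : (List.range (min l1.length l2.length)).filter
        (fun j => decide (l1[j]? ≠ l2[j]?)) = [i]) :
    (l1.zip l2).map (fun p => if p.1 = p.2 then p.1 else '-')
    = l1.take i ++ '-' :: (l1.drop (i+1)).take (min l1.length l2.length - (i+1)) := by
  set n := min l1.length l2.length with hn
  have hn1 : n ≤ l1.length := Nat.min_le_left _ _
  have hn2 : n ≤ l2.length := Nat.min_le_right _ _
  have himem : i ∈ (List.range n).filter (fun j => decide (l1[j]? ≠ l2[j]?)) := by
    rw [hfil]; exact List.mem_singleton_self i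
  have hiq := List.mem_filter.mp himem
  have hin : i < n := List.mem_range.mp hiq.1
  have hine : l1[i]? ≠ l2[i]? := by simpa using hiq.2
  have huniq : ∀ j, j < n → l1[j]? ≠ l2[j]? → j = i := by
    intro j hj hq
    have : j ∈ (List.range n).filter (fun j => decide (l1[j]? ≠ l2[j]?)) :=
      List.mem_filter.mpr ⟨List.mem_range.mpr hj, by simpa using hq⟩
    rw [hfil] at this
    simpa using this
  have hagree : ∀ j, j < n → j ≠ i → l1[j]? = l2[j]? := by
    intro j hj hji
    by_contra hq
    exact hji (huniq j hj hq)
  apply List.ext_getElem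
  · simp [List.length_zip, ← hn]
    omega
  · intro j h1 h2
    have hjn : j < n := by simpa [List.length_zip, ← hn] using h1
    have hj1 : j < l1.length := lt_of_lt_of_le hjn hn1
    have hj2 : j < l2.length := lt_of_lt_of_le hjn hn2
    rw [List.getElem_map, List.getElem_zip]
    rcases lt_trichotomy j i with hlt | heq | hgt
    · have hji : l1[j] = l2[j] := by
        have := hagree j hjn (Nat.ne_of_lt hlt)
        simpa [List.getElem?_eq_getElem, hj1, hj2] using this
      rw [if_pos hji]
      rw [List.getElem_append_left (by simpa [Nat.min_eq_left (le_of_lt (lt_of_lt_of_le hin hn1))] using hlt)]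
      simp [List.getElem_take]
    · subst heq
      have hne : l1[j] ≠ l2[j] := by
        intro hc
        exact hine (by simp [hj1, hj2, hc])
      rw [if_neg hne]
      have hlen : (l1.take j).length = j := by
        simp [Nat.min_eq_left (le_of_lt (lt_of_lt_of_le hin hn1))]
      rw [List.getElem_append_right (by omega)]
      simp [hlen]
    · have hji : l1[j] = l2[j] := by
        have := hagree j hjn (by omega)
        simpa [List.getElem?_eq_getElem, hj1, hj2] using this
      rw [if_pos hji]
      have hlen : (l1.take i).length = i := by
        simp [Nat.min_eq_left (le_of_lt (lt_of_lt_of_le hin hn1))]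
      have hidx : j - (l1.take i).length = (j - i - 1) + 1 := by omega
      have hv : ('-' :: (l1.drop (i+1)).take (n-(i+1)))[j - (l1.take i).length]? = some l1[j] := by
        rw [hidx]
        simp only [List.getElem?_cons_succ]
        rw [List.getElem?_take_of_lt (by omega : j - i - 1 < n - (i+1)), List.getElem?_drop]
        have harg : i + 1 + (j - i - 1) = j := by omega
        rw [harg, List.getElem?_eq_getElem hj1]
      rw [List.getElem_append_right (by omega)]
      have hlt' : j - (l1.take i).length < ('-' :: (l1.drop (i+1)).take (n-(i+1))).length := by
        simp [hlen]; omega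
      have h2' := List.getElem?_eq_getElem hlt'
      exact (Option.some.inj (h2'.symm.trans hv)).symm

-- ===== VERDICT (by name: the statement is the Claim_ definition above) =====
theorem combine_terms_spec : Claim_equal_combine_terms := by
  intro term1 term2 _
  unfold Spec_combine_terms combine_terms combine_terms_alt
  simp only []
  rw [pvFoldA]
  set l1 := term1.toList with hl1
  set l2 := term2.toList with hl2
  set n := min l1.length l2.length with hn
  have hmin : min ((l1.length : Int)) ((l2.length : Int)) = ((n : Nat) : Int) := by
    rw [hn]; push_cast; ring
  rw [hmin, PySem.List.pyRange_zero_natCast, List.filter_map]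
  have hpred : ((fun i : Int => decide (PySem.List.pyGet? l1 i ≠ PySem.List.pyGet? l2 i)) ∘ (fun k : Nat => (k : Int)))
      = (fun i : Nat => decide (l1[i]? ≠ l2[i]?)) := by
    funext i
    simp [Function.comp, PySem.List.pyGet?_natCast]
  rw [hpred, pvCount l1 l2, List.countP_eq_length_filter, ← hn]
  set F := (List.range n).filter (fun i : Nat => decide (l1[i]? ≠ l2[i]?)) with hF
  simp only [List.nil_append, List.length_map]
  by_cases hc : F.length = 1
  · obtain ⟨i, hFi⟩ := List.length_eq_one_iff.mp hc
    rw [hFi]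
    simp only [List.map_cons, List.map_nil, PySem.List.pyGetD_zero_cons, List.length_cons,
      List.length_nil, PySem.List.slice_to_natCast]
    rw [if_pos (by norm_num), if_neg (by norm_num)]
    have hcast : ((i : Nat) : Int) + 1 = (((i + 1 : Nat)) : Int) := by push_cast; ring
    rw [hcast, PySem.List.slice_natCast]
    have hreb := pvRebuild l1 l2 i (by rw [← hn]; exact hFi)
    rw [← hn] at hreb
    rw [hreb]
    simp
  · have hA : ¬ ((0 : Int) + (F.length : Int) = 1) := by
      intro h; apply hc; omega
    rw [if_neg hA, if_pos hc]
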